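-- pv_equiv track=rewrite | github.com/ghamlet/Preparation_for_NTO_2024-25 | DRONE/cross_runner_eyecar.py | is_car_stopped
-- ===== SOURCE A (Python) =====
-- def is_car_stopped(data, threshold=4, stability_count=45):
--     """
--     Определяет, остановлена ли машина на основе показаний "left" и "right".
--
--     :param data: Список кортежей с показаниями (left, right)
--     :param threshold: Максимальное изменение для определения остановки
--     :param stability_count: Количество последовательных измерений, которые должны быть стабильными
--     :return: True, если машина остановлена, иначе False
--     """
--     stable_count = 0
--
--     for i in range(1, len(data)):
--         left_change = abs(data[i][0] - data[i - 1][0])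
--         right_change = abs(data[i][1] - data[i - 1][1])
--
--         if left_change <= threshold and right_change <= threshold:
--             stable_count += 1
--         else:
--             stable_count = 0  # Сброс, если изменения превышают порог
--
--         if stable_count >= stability_count:
--             return True  # Машина остановлена
--
--     return False  # Машина не остановлена
-- ===== SOURCE B (Python) =====
-- def is_car_stopped(data, threshold=4, stability_count=45):
--     """Table-then-split: build per-transition stability flags, take the max
--     run of consecutive stable transitions, compare with stability_count."""
--     if len(data) < 2:
--         return False
--     flags = [abs(b[0] - a[0]) <= threshold and abs(b[1] - a[1]) <= threshold
--              for a, b in zip(data, data[1:])]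
--     return _max_run(flags) >= stability_count
--
--
-- def _max_run(flags):
--     # length of the longest run of True: split at the first False, recurse
--     lead = next((i for i, f in enumerate(flags) if not f), len(flags))
--     if lead == len(flags):
--         return lead
--     return max(lead, _max_run(flags[lead + 1:]))
-- ===== Notes on version B (the rewrite author's own statement) =====
-- stated objective: alternative
-- what changed: Replaces A's single streaming counter with early return by a two-pass formulation: a table of per-transition stability flags (zip of data with its tail) followed by a recursive split-at-first-False computation of the longest stable run, compared once against stability_count.
import Mathlib
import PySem

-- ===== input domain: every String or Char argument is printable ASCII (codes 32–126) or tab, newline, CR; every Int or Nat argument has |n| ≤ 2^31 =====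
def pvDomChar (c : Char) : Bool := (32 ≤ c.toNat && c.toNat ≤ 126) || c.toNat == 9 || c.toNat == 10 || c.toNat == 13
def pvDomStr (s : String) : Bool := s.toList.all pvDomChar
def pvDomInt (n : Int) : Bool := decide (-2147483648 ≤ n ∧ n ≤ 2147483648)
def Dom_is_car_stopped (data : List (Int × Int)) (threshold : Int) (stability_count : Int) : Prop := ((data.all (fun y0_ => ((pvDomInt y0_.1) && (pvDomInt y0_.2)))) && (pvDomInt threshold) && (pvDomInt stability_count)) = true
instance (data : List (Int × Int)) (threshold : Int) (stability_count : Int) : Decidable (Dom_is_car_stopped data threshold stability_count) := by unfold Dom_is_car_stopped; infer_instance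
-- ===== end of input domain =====

-- B replaces A's streaming counter (with reset and early return) by a flag table
-- plus a recursive longest-run computation; objective: alternative (same cost).

-- ===== PORT A =====
-- the 'for i in range(1, len(data))' loop with early return, carrying stable_count
def isCarStoppedGo (data : List (Int × Int)) (threshold stability_count : Int) :
    List Int → Int → Bool
  | [], _ => false
  | i :: rest, stable_count0 =>
    match PySem.List.pyGet? data i, PySem.List.pyGet? data (i - 1) with
    | some cur, some prev =>
      let left_change := |cur.1 - prev.1|
      let right_change := |cur.2 - prev.2|
      let stable := if left_change ≤ threshold ∧ right_change ≤ threshold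
                    then stable_count0 + 1 else 0
      if stability_count ≤ stable then true
      else isCarStoppedGo data threshold stability_count rest stable
    | _, _ => false  -- unreachable: every i in range(1, len(data)) is in range

def is_car_stopped (data : List (Int × Int)) (threshold : Int) (stability_count : Int) : Bool :=
  isCarStoppedGo data threshold stability_count
    (PySem.List.pyRange 1 (data.length : Int) 1) 0

-- ===== PORT B =====
-- _max_run: longest run of True, splitting at the first False and recursing.
-- 'next((i for i, f in enumerate(flags) if not f), len(flags))' is findIdx;
-- the slice flags[lead+1:] (nonnegative start) is drop (lead+1).
def maxRunB (flags : List Bool) : Int :=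
  let lead := flags.findIdx (fun f => !f)
  if lead = flags.length then (lead : Int)
  else max (lead : Int) (maxRunB (flags.drop (lead + 1)))
termination_by flags.length
decreasing_by
  simp only [List.length_drop]
  have h1 := List.findIdx_le_length (p := fun f => !f) (xs := flags)
  omega

def is_car_stopped_alt (data : List (Int × Int)) (threshold : Int) (stability_count : Int) : Bool :=
  if data.length < 2 then false
  else
    let flags := (data.zip (data.drop 1)).map
      (fun ab => decide (|ab.2.1 - ab.1.1| ≤ threshold ∧ |ab.2.2 - ab.1.2| ≤ threshold))
    decide (stability_count ≤ maxRunB flags)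

-- ===== PRECONDITION & SPEC =====
def Spec_is_car_stopped (data : List (Int × Int)) (threshold : Int) (stability_count : Int) (out : Bool) : Prop := out = is_car_stopped_alt data threshold stability_count
instance (data : List (Int × Int)) (threshold : Int) (stability_count : Int) (out : Bool) : Decidable (Spec_is_car_stopped data threshold stability_count out) := by unfold Spec_is_car_stopped; infer_instance

-- ===== CLAIM (what is proved, stated in full; the proofs are below) =====
def Claim_equal_is_car_stopped : Prop := ∀ (data : List (Int × Int)) (threshold : Int) (stability_count : Int), Dom_is_car_stopped data threshold stability_count → Spec_is_car_stopped data threshold stability_count (is_car_stopped data threshold stability_count)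

-- ===== LEMMAS AND PROOFS =====

def pvFlags (data : List (Int × Int)) (threshold : Int) : List Bool :=
  (data.zip (data.drop 1)).map
    (fun ab => decide (|ab.2.1 - ab.1.1| ≤ threshold ∧ |ab.2.2 - ab.1.2| ≤ threshold))

def aLoop (k : Int) : List Bool → Int → Bool
  | [], _ => false
  | f :: rest, sc =>
    let sc' := if f then sc + 1 else 0
    if k ≤ sc' then true else aLoop k rest sc'

theorem length_pvFlags (data : List (Int × Int)) (threshold : Int) :
    (pvFlags data threshold).length = data.length - 1 := by
  simp [pvFlags]

theorem maxRunB_nil : maxRunB [] = 0 := by rw [maxRunB]; simp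

theorem maxRunB_nonneg : ∀ (flags : List Bool), 0 ≤ maxRunB flags := by
  intro flags
  induction flags using maxRunB.induct with
  | case1 flags lead h => rw [maxRunB]; rw [if_pos h]; exact Int.natCast_nonneg _
  | case2 flags lead h ih => rw [maxRunB]; rw [if_neg h]; exact le_max_of_le_right ih

theorem take_findIdx_eq_replicate (flags : List Bool) :
    flags.take (flags.findIdx (fun f => !f)) = List.replicate (flags.findIdx (fun f => !f)) true := by
  have hle := List.findIdx_le_length (p := fun f => !f) (xs := flags)
  refine List.eq_replicate_iff.mpr ⟨by simp [List.length_take]; omega, ?_⟩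
  intro b hb
  obtain ⟨i, hi, rfl⟩ := List.mem_iff_getElem.mp hb
  rw [List.length_take] at hi
  have hi2 : i < flags.findIdx (fun f => !f) := (lt_min_iff.mp hi).1
  have := List.not_of_lt_findIdx hi2
  simp only [List.getElem_take]
  simpa using this

theorem aLoop_replicate (k : Int) : ∀ (m : Nat) (rest : List Bool) (sc : Int),
    aLoop k (List.replicate m true ++ rest) sc
      = if 1 ≤ m ∧ k ≤ sc + m then true else aLoop k rest (sc + m) := by
  intro m
  induction m with
  | zero => intro rest sc; simp
  | succ n ih =>
    intro rest sc
    rw [List.replicate_succ, List.cons_append]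
    show (if k ≤ sc + 1 then true else aLoop k (List.replicate n true ++ rest) (sc+1)) = _
    rw [ih]
    have he : sc + 1 + (n : Int) = sc + (↑n + 1) := by ring
    push_cast
    split_ifs <;> simp only [true_and, not_and, not_le] at * <;>
      first | rfl | omega | rw [he]

theorem aLoop_cons_false (k : Int) (rest : List Bool) (sc : Int) :
    aLoop k (false :: rest) sc = if k ≤ 0 then true else aLoop k rest 0 := by
  simp [aLoop]

theorem aLoop_eq_maxRun (k : Int) : ∀ (flags : List Bool),
    aLoop k flags 0 = (!flags.isEmpty && decide (k ≤ maxRunB flags)) := by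
  intro flags
  induction flags using maxRunB.induct with
  | case1 flags lead h =>
    have hlead : List.findIdx (fun f => !f) flags = lead := rfl
    have hsplit : flags = List.replicate lead true ++ flags.drop lead := by
      conv_lhs => rw [← List.take_append_drop lead flags]
      rw [show flags.take lead = List.replicate lead true from take_findIdx_eq_replicate flags]
    have hd : flags.drop lead = [] := by rw [h]; exact List.drop_length
    rw [maxRunB, if_pos h]
    simp only [hlead]
    conv_lhs => rw [hsplit, hd]
    rw [aLoop_replicate]
    by_cases hl0 : lead = 0
    · have : flags = [] := List.length_eq_zero_iff.mp (by omega)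
      subst this
      simp [aLoop, hl0]
    · have hne : flags.isEmpty = false := by
        simp only [List.isEmpty_eq_false_iff, ne_eq, ← List.length_eq_zero_iff]; omega
      rw [hne]
      simp only [aLoop, Bool.not_false, Bool.true_and, zero_add]
      split_ifs with hc
      · symm; simp only [decide_eq_true_eq]; omega
      · symm; simp only [decide_eq_false_iff_not]; omega
  | case2 flags lead h ih =>
    have hlead : List.findIdx (fun f => !f) flags = lead := rfl
    have hlt : lead < flags.length := lt_of_le_of_ne (List.findIdx_le_length) h
    have hsplit : flags = List.replicate lead true ++ flags.drop lead := by
      conv_lhs => rw [← List.take_append_drop lead flags]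
      rw [show flags.take lead = List.replicate lead true from take_findIdx_eq_replicate flags]
    have hflead : flags[lead]'hlt = false := by
      have := List.findIdx_getElem (p := fun f => !f) (xs := flags) (w := hlt)
      simpa using this
    have hd : flags.drop lead = false :: List.drop (lead + 1) flags := by
      rw [List.drop_eq_getElem_cons hlt, hflead]
    rw [maxRunB, if_neg h]
    simp only [hlead]
    conv_lhs => rw [hsplit, hd]
    rw [aLoop_replicate, aLoop_cons_false, ih]
    have hne : flags.isEmpty = false := by
      simp only [List.isEmpty_eq_false_iff, ne_eq, ← List.length_eq_zero_iff]; omega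
    rw [hne]
    have hnn := maxRunB_nonneg (List.drop (lead + 1) flags)
    by_cases hre : (List.drop (lead + 1) flags).isEmpty
    · have hnil : List.drop (lead + 1) flags = [] := List.isEmpty_iff.mp hre
      rw [hnil, maxRunB_nil] at *
      simp only [List.isEmpty_nil, Bool.not_true, Bool.false_and, Bool.not_false, Bool.true_and, zero_add]
      split_ifs with h1 h2
      · symm; simp only [decide_eq_true_eq, le_max_iff]; omega
      · symm; simp only [decide_eq_true_eq, le_max_iff]; omega
      · symm; simp only [decide_eq_false_iff_not, le_max_iff, not_or]; omega
    · simp only [Bool.not_eq_true] at hre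
      rw [hre]
      simp only [Bool.not_false, Bool.true_and, zero_add]
      split_ifs with h1 h2
      · symm; simp only [decide_eq_true_eq, le_max_iff]; omega
      · symm; simp only [decide_eq_true_eq, le_max_iff]; omega
      · simp only [decide_eq_decide, le_max_iff]; omega

theorem go_eq_aLoop (data : List (Int × Int)) (th k : Int) :
    ∀ (fuel i : Nat) (sc : Int), data.length ≤ i + 1 + fuel →
      isCarStoppedGo data th k (PySem.List.pyRange ((i : Int) + 1) (data.length : Int) 1) sc
        = aLoop k ((pvFlags data th).drop i) sc := by
  intro fuel
  induction fuel with
  | zero =>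
    intro i sc hle
    rw [PySem.List.pyRange_one_eq_nil (by exact_mod_cast (by omega : data.length ≤ i + 1))]
    rw [List.drop_eq_nil_of_le (by rw [length_pvFlags]; omega)]
    rfl
  | succ fuel ih =>
    intro i sc hle
    by_cases hcase : data.length ≤ i + 1
    · rw [PySem.List.pyRange_one_eq_nil (by exact_mod_cast hcase)]
      rw [List.drop_eq_nil_of_le (by rw [length_pvFlags]; omega)]
      rfl
    · have hi1 : i + 1 < data.length := by omega
      rw [PySem.List.pyRange_one_cons (by exact_mod_cast hi1)]
      have hc1 : ((i : Int) + 1) = ((i + 1 : Nat) : Int) := by push_cast; ring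
      rw [hc1]
      have hc2 : ((i + 1 : Nat) : Int) - 1 = ((i : Nat) : Int) := by push_cast; ring
      rw [isCarStoppedGo, hc2, PySem.List.pyGet?_natCast, PySem.List.pyGet?_natCast]
      rw [List.getElem?_eq_getElem hi1, List.getElem?_eq_getElem (by omega : i < data.length)]
      have hidrop : i < (pvFlags data th).length := by rw [length_pvFlags]; omega
      rw [List.drop_eq_getElem_cons hidrop]
      have hfl : (pvFlags data th)[i]'hidrop
          = decide (|(data[i+1]'hi1).1 - (data[i]'(by omega)).1| ≤ th ∧
                    |(data[i+1]'hi1).2 - (data[i]'(by omega)).2| ≤ th) := by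
        simp only [pvFlags, List.getElem_map, List.getElem_zip, List.getElem_drop,
          Nat.add_comm 1 i]
      rw [hfl]
      show _ = aLoop k (_ :: _) sc
      rw [aLoop]
      simp only [decide_eq_true_eq]
      split_ifs with hp hk hk
      · rfl
      · exact ih (i + 1) _ (by omega)
      · rfl
      · exact ih (i + 1) _ (by omega)

-- ===== VERDICT (by name: the statement is the Claim_ definition above) =====
theorem is_car_stopped_spec : Claim_equal_is_car_stopped := by
  intro data threshold stability_count _
  unfold Spec_is_car_stopped
  have h0 := go_eq_aLoop data threshold stability_count data.length 0 0 (by omega)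
  simp only [Nat.cast_zero, zero_add, List.drop_zero] at h0
  rw [is_car_stopped, h0, aLoop_eq_maxRun]
  rw [is_car_stopped_alt]
  rw [show ((data.zip (data.drop 1)).map
      (fun ab => decide (|ab.2.1 - ab.1.1| ≤ threshold ∧ |ab.2.2 - ab.1.2| ≤ threshold)))
      = pvFlags data threshold from rfl]
  by_cases h2 : data.length < 2
  · rw [if_pos h2]
    have : (pvFlags data threshold).isEmpty = true := by
      simp only [List.isEmpty_iff, ← List.length_eq_zero_iff, length_pvFlags]; omega
    rw [this]
    rfl
  · rw [if_neg h2]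
    have : (pvFlags data threshold).isEmpty = false := by
      simp only [List.isEmpty_eq_false_iff, ne_eq, ← List.length_eq_zero_iff, length_pvFlags]
      omega
    rw [this]
    rfl
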